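-- pv_equiv track=rewrite | github.com/RobinFiveWords/AdventOfCode | 2025/day02.py | invalid_ids2
-- ===== SOURCE A (Python) =====
-- def invalid_ids2(ranges):
--   current = 1
--   invalids = set()
--   maximum = ranges[-1][1]
--   while int(str(current) * 2) <= maximum:
--     repeats = 2
--     while (candidate := int(str(current) * repeats)) <= maximum:
--       invalids.add(candidate)
--       repeats += 1
--     current += 1
--   result = []
--   invalids = sorted(invalids)
--   invalid_index = 0
--   range_index = 0
--   while invalid_index < len(invalids) and range_index < len(ranges):
--     i = invalids[invalid_index]
--     r = ranges[range_index]
--     if i < r[0]: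
--       invalid_index += 1
--     elif i > r[1]:
--       range_index += 1
--     else:
--       result.append(i)
--       invalid_index += 1
--   return result
-- ===== SOURCE B (Python) =====
-- def invalid_ids2(ranges):
--     maximum = ranges[-1][1]
--     invalids = set()
--     current = 1
--     while int(str(current) * 2) <= maximum:
--         repeats = 2
--         while (candidate := int(str(current) * repeats)) <= maximum:
--             invalids.add(candidate)
--             repeats += 1
--         current += 1
--     result = []
--     rest = sorted(invalids)
--     for lo, hi in ranges:
--         while rest and rest[0] < lo:
--             rest = rest[1:]
--         while rest and rest[0] <= hi:
--             result.append(rest[0])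
--             rest = rest[1:]
--     return result
-- ===== Notes on version B (the rewrite author's own statement) =====
-- stated objective: alternative
-- what changed: The generation loop is kept, but A's single two-pointer merge loop with explicit invalid_index/range_index counters is replaced by a fold over the ranges that splits the remaining sorted candidate list per range (drop the prefix below lo, move the prefix up to hi into the result).
import Mathlib
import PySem

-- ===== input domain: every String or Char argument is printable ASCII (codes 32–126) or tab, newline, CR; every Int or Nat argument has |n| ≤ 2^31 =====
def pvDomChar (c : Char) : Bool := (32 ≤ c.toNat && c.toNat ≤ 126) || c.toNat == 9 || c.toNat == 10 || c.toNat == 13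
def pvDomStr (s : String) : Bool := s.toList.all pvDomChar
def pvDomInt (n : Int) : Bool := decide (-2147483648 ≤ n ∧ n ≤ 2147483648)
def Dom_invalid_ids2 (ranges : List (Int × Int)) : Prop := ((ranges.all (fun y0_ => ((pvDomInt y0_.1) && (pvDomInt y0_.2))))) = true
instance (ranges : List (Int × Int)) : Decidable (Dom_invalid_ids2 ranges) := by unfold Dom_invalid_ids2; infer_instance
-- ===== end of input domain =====

-- B keeps A's candidate-generation loop but replaces the two-pointer merge by a per-range
-- split of the sorted candidate list (alternative decomposition, same cost).

-- ===== PORT A =====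
-- int(str(c) * r): r copies of the decimal string of c parsed back to an int.
-- c ≥ 1 at every call site, so int() never fails; getD 0 is unreachable there.
def pvRep (c r : Int) : Int :=
  (PySem.Int.ofChars? ((List.replicate r.toNat (PySem.Int.toChars c)).flatten)).getD 0

-- inner 'while (candidate := int(str(current)*repeats)) <= maximum' loop; fuel 64 suffices:
-- a candidate with repeats ≥ 12 has ≥ 12 digits > 2^31 ≥ maximum on Dom, so ≤ 11 iterations run.
def pvGenInner (maximum c : Int) : Nat → Int → PySem.Set Int → PySem.Set Int
  | 0, _, s => s
  | fuel + 1, repeats, s =>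
    let candidate := pvRep c repeats
    if candidate ≤ maximum then pvGenInner maximum c fuel (repeats + 1) (PySem.Set.add s candidate)
    else s

-- outer 'while int(str(current) * 2) <= maximum' loop; fuel maximum.toNat + 1 suffices since
-- int(str(c)*2) ≥ c, so the loop stops once current exceeds maximum.
def pvGenOuter (maximum : Int) : Nat → Int → PySem.Set Int → PySem.Set Int
  | 0, _, s => s
  | fuel + 1, current, s =>
    if pvRep current 2 ≤ maximum then
      pvGenOuter maximum fuel (current + 1) (pvGenInner maximum current 64 2 s)
    else s

-- 'invalids = sorted(invalids)' after the generation loops.  This helper is the transliteration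
-- of the generation phase, which is textually IDENTICAL in Source A and Source B, so both ports call it.
def pvInvalids (maximum : Int) : List Int :=
  PySem.List.sorted (pvGenOuter maximum (maximum.toNat + 1) 1 PySem.Set.empty) (fun x => x) false

-- A's two-pointer merge: the two indices into the fixed lists are rendered as the two suffixes.
def pvMergeA : List Int → List (Int × Int) → List Int
  | [], _ => []
  | _ :: _, [] => []
  | i :: is, r :: rs =>
    if i < r.1 then pvMergeA is (r :: rs)
    else if i > r.2 then pvMergeA (i :: is) rs
    else i :: pvMergeA is (r :: rs)
  termination_by is rs => is.length + rs.length

def invalid_ids2 (ranges : List (Int × Int)) : List Int :=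
  match PySem.List.pyGet? ranges (-1) with
  | none => []   -- ranges[-1] raises IndexError: excluded by Pre_invalid_ids2
  | some last => pvMergeA (pvInvalids last.2) ranges

-- ===== PORT B =====
-- 'while rest and rest[0] < lo: rest = rest[1:]'
def pvDropBelow (lo : Int) : List Int → List Int
  | [] => []
  | i :: is => if i < lo then pvDropBelow lo is else i :: is

-- 'while rest and rest[0] <= hi: result.append(rest[0]); rest = rest[1:]' — returns the
-- appended elements together with the remaining rest.
def pvSpanUpto (hi : Int) : List Int → List Int × List Int
  | [] => ([], [])
  | i :: is =>
    if i ≤ hi then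
      let p := pvSpanUpto hi is
      (i :: p.1, p.2)
    else ([], i :: is)

-- one iteration of B's 'for lo, hi in ranges' loop over the state (result, rest)
def pvStepB (st : List Int × List Int) (r : Int × Int) : List Int × List Int :=
  let rest1 := pvDropBelow r.1 st.2
  let p := pvSpanUpto r.2 rest1
  (st.1 ++ p.1, p.2)

def invalid_ids2_alt (ranges : List (Int × Int)) : List Int :=
  match PySem.List.pyGet? ranges (-1) with
  | none => []   -- ranges[-1] raises IndexError: excluded by Pre_invalid_ids2
  | some last => (ranges.foldl pvStepB ([], pvInvalids last.2)).1

-- ===== PRECONDITION & SPEC =====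
-- Pre_ excludes only the empty list, on which 'ranges[-1]' raises IndexError in both A and B.
def Pre_invalid_ids2 (ranges : List (Int × Int)) : Prop := ranges ≠ []
instance (ranges : List (Int × Int)) : Decidable (Pre_invalid_ids2 ranges) := by
  unfold Pre_invalid_ids2; infer_instance

def pvWitness_invalid_ids2 : (List (Int × Int)) := [(1, 30), (40, 60)]

def Spec_invalid_ids2 (ranges : List (Int × Int)) (out : List Int) : Prop := out = invalid_ids2_alt ranges
instance (ranges : List (Int × Int)) (out : List Int) : Decidable (Spec_invalid_ids2 ranges out) := by unfold Spec_invalid_ids2; infer_instance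

-- ===== CLAIM (what is proved, stated in full; the proofs are below) =====
def Claim_equal_invalid_ids2 : Prop := ∀ (ranges : List (Int × Int)), Dom_invalid_ids2 ranges → Pre_invalid_ids2 ranges → Spec_invalid_ids2 ranges (invalid_ids2 ranges)

-- ===== LEMMAS AND PROOFS =====

theorem pvMergeA_nil (rs : List (Int × Int)) : pvMergeA [] rs = [] := by
  cases rs <;> simp [pvMergeA]

theorem pvMergeA_nil_ranges (xs : List Int) : pvMergeA xs [] = [] := by
  cases xs <;> simp [pvMergeA]

theorem pvDropBelow_sublist (lo : Int) (xs : List Int) : (pvDropBelow lo xs).Sublist xs := by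
  induction xs with
  | nil => simp [pvDropBelow]
  | cons i is ih =>
    simp only [pvDropBelow]
    split
    · exact ih.trans (List.sublist_cons_self i is)
    · exact List.Sublist.refl _

theorem pvSpanUpto_snd_sublist (hi : Int) (xs : List Int) : (pvSpanUpto hi xs).2.Sublist xs := by
  induction xs with
  | nil => simp [pvSpanUpto]
  | cons i is ih =>
    simp only [pvSpanUpto]
    split
    · exact ih.trans (List.sublist_cons_self i is)
    · exact List.Sublist.refl _

-- the per-range characterisation of A's merge on a sorted candidate list
theorem pvMergeA_cons_range (lo hi : Int) (rs : List (Int × Int)) :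
    ∀ xs : List Int, xs.Pairwise (· ≤ ·) →
      pvMergeA xs ((lo, hi) :: rs) =
        (pvSpanUpto hi (pvDropBelow lo xs)).1 ++
          pvMergeA (pvSpanUpto hi (pvDropBelow lo xs)).2 rs := by
  intro xs
  induction xs with
  | nil => intro _; simp [pvDropBelow, pvSpanUpto, pvMergeA_nil]
  | cons i is ih =>
    intro hp
    rcases List.pairwise_cons.mp hp with ⟨hhead, htail⟩
    by_cases h1 : i < lo
    · simpa [pvMergeA, h1, pvDropBelow] using ih htail
    · by_cases h2 : i > hi
      · have hih : ¬ i ≤ hi := by omega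
        simp [pvMergeA, h1, h2, pvDropBelow, pvSpanUpto, hih]
      · have hih : i ≤ hi := by omega
        have hdrop : pvDropBelow lo is = is := by
          cases is with
          | nil => simp [pvDropBelow]
          | cons j js =>
            have hj : lo ≤ j := le_trans (by omega) (hhead j (List.mem_cons_self))
            have hj' : ¬ j < lo := by omega
            simp [pvDropBelow, hj']
        have hthis := ih htail
        rw [hdrop] at hthis
        simp only [pvMergeA, if_neg h1, if_neg h2, pvDropBelow, pvSpanUpto, if_pos hih]
        simp [hthis]

-- B's fold over the ranges computes A's merge
theorem pvFoldl_stepB (rs : List (Int × Int)) :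
    ∀ (xs acc : List Int), xs.Pairwise (· ≤ ·) →
      (rs.foldl pvStepB (acc, xs)).1 = acc ++ pvMergeA xs rs := by
  induction rs with
  | nil => intro xs acc _; simp [pvMergeA_nil_ranges]
  | cons r rs' ih =>
    intro xs acc hp
    obtain ⟨lo, hi⟩ := r
    have hp1 : (pvDropBelow lo xs).Pairwise (· ≤ ·) := hp.sublist (pvDropBelow_sublist lo xs)
    have hp2 : ((pvSpanUpto hi (pvDropBelow lo xs)).2).Pairwise (· ≤ ·) :=
      hp1.sublist (pvSpanUpto_snd_sublist hi _)
    simp only [List.foldl_cons, pvStepB]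
    rw [ih _ _ hp2, pvMergeA_cons_range lo hi rs' xs hp, List.append_assoc]

theorem pvInvalids_pairwise (maximum : Int) : (pvInvalids maximum).Pairwise (· ≤ ·) := by
  simpa using PySem.List.sorted_pairwise (xs := pvGenOuter maximum (maximum.toNat + 1) 1 PySem.Set.empty) (key := fun x => x)

-- ===== VERDICT (by name: the statement is the Claim_ definition above) =====
theorem pyGet_last_exists (xs : List (Int × Int)) (h : xs ≠ []) :
    ∃ l, PySem.List.pyGet? xs (-1) = some l := by
  cases xs with
  | nil => exact absurd rfl h
  | cons a t => simp [PySem.List.pyGet?, PySem.List.pyIdx?]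

theorem invalid_ids2_spec : Claim_equal_invalid_ids2 := by
  intro ranges _ hpre
  obtain ⟨last, h⟩ := pyGet_last_exists ranges hpre
  unfold Spec_invalid_ids2 invalid_ids2 invalid_ids2_alt
  rw [h]
  exact (pvFoldl_stepB ranges (pvInvalids last.2) [] (pvInvalids_pairwise last.2)).symm
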